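-- pv_equiv track=rewrite | github.com/tdunn1/ChemGather | Pubchem_searcher.py | frac_list
-- ===== SOURCE A (Python) =====
-- def frac_list(cids_list, k):
--     n = len(cids_list)//k
--     r = len(cids_list)%k
--     set_list = []
--     for i in range(n):
--         cid_nums = ','.join(map(str,cids_list[k*i:k*(i + 1)]))
--         set_list.append(cid_nums)
--
--     if r:
--         cid_nums = ','.join(map(str,cids_list[-r:]))
--         set_list.append(cid_nums)
--
--     return set_list
-- ===== SOURCE B (Python) =====
-- def frac_list(cids_list, k):
--     set_list = []
--     chunk = []
--     for cid in cids_list: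
--         chunk.append(str(cid))
--         if len(chunk) == k:
--             set_list.append(','.join(chunk))
--             chunk = []
--     if chunk:
--         set_list.append(','.join(chunk))
--     return set_list
-- ===== Notes on version B (the rewrite author's own statement) =====
-- stated objective: alternative
-- what changed: Replaces A's index arithmetic (n=len//k slice-per-range-index loop plus a separate cids_list[-r:] remainder branch) with a single element-by-element pass that accumulates a current chunk and flushes it whenever it reaches size k; no slicing or division at all.
-- outside the precondition, e.g. on frac_list([1, 2, 3], -2): A returns ['2,3'], B returns ['1,2,3']; on frac_list([1, 2], -2): A returns [], B returns ['1,2']; on frac_list([1], 0): A raises ZeroDivisionError, B returns ['1']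
import Mathlib
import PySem

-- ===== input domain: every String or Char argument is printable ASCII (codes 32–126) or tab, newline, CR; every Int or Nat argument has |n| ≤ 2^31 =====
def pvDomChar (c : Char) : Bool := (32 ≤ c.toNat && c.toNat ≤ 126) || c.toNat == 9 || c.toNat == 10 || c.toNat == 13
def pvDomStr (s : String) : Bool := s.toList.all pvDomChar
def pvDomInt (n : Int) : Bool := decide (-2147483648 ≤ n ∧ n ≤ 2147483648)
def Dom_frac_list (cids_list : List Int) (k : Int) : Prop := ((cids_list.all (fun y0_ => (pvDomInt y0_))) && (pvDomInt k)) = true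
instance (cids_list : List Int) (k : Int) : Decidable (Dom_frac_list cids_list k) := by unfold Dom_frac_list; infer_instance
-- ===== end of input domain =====

-- B replaces A's index-arithmetic chunking (n = len//k slice loop plus a separate cids_list[-r:]
-- remainder branch) with one element-by-element pass accumulating a chunk that is flushed at size k;
-- equal values on Pre_ (positive chunk size); alternative decomposition, no speed claim.


-- ===== PORT A =====
def frac_list (cids_list : List Int) (k : Int) : List String :=
  let n := PySem.Int.floordiv (cids_list.length : Int) k
  let r := PySem.Int.mod (cids_list.length : Int) k
  let set_list : List String :=
    (PySem.List.pyRange 0 n 1).foldl (fun acc i =>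
      acc ++ [PySem.Str.join ","
        ((PySem.List.slice cids_list (some (k * i)) (some (k * (i + 1)))).map PySem.Int.toStr)]) []
  if r ≠ 0 then
    set_list ++ [PySem.Str.join ","
      ((PySem.List.slice cids_list (some (-r)) none).map PySem.Int.toStr)]
  else set_list

-- ===== PORT B =====
-- loop body: append str(cid) to the current chunk; when the chunk reaches size k, flush it
def bStep (k : Int) (p : List String × List String) (cid : Int) : List String × List String :=
  let chunk := p.2 ++ [PySem.Int.toStr cid]
  if (chunk.length : Int) = k then (p.1 ++ [PySem.Str.join "," chunk], [])
  else (p.1, chunk)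

def frac_list_alt (cids_list : List Int) (k : Int) : List String :=
  let st := cids_list.foldl (bStep k) ([], [])
  if st.2 ≠ [] then st.1 ++ [PySem.Str.join "," st.2] else st.1

-- ===== PRECONDITION & SPEC =====
-- Pre_ restricts to positive chunk sizes, the function's natural domain: A raises ZeroDivisionError
-- on k = 0, and for negative k A's values ([] or a single floor-division tail slice) are artefacts
-- of floor division on malformed input no caller would specify.
def Pre_frac_list (cids_list : List Int) (k : Int) : Prop := 0 < k
instance (cids_list : List Int) (k : Int) : Decidable (Pre_frac_list cids_list k) := by
  unfold Pre_frac_list; infer_instance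
def pvWitness_frac_list : List Int × Int := ([1, 2, 3], 2)
def Spec_frac_list (cids_list : List Int) (k : Int) (out : List String) : Prop := out = frac_list_alt cids_list k
instance (cids_list : List Int) (k : Int) (out : List String) : Decidable (Spec_frac_list cids_list k out) := by unfold Spec_frac_list; infer_instance

-- ===== CLAIM (what is proved, stated in full; the proofs are below) =====
def Claim_equal_frac_list : Prop := ∀ (cids_list : List Int) (k : Int), Dom_frac_list cids_list k → Pre_frac_list cids_list k → Spec_frac_list cids_list k (frac_list cids_list k)

-- ===== LEMMAS AND PROOFS =====

-- reference: the list chunked into runs of K, each joined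
def chunkStr (K : Nat) (l : List Int) : List String :=
  if h : l = [] ∨ K = 0 then [] else
    PySem.Str.join "," ((l.take K).map PySem.Int.toStr) :: chunkStr K (l.drop K)
termination_by l.length
decreasing_by
  push_neg at h
  rcases h with ⟨h1, h2⟩
  have : 0 < l.length := List.length_pos_iff.mpr h1
  simp [List.length_drop]; omega

lemma pvSlice_chunk (cids : List Int) (K j : Nat) :
    PySem.List.slice cids (some ((K : Int) * (j : Int))) (some ((K : Int) * (j : Int) + (K : Int)))
      = List.take K (List.drop (K * j) cids) := by
  have h := PySem.List.slice_natCast_add cids (K * j) K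
  push_cast at h
  exact h

lemma pvPointA (cids : List Int) (K j : Nat) :
    PySem.List.slice cids (some ((K : Int) * (j : Int))) (some ((K : Int) * ((j : Int) + 1)))
      = List.take K (List.drop (K * j) cids) := by
  rw [mul_add, mul_one]; exact pvSlice_chunk cids K j

-- the range-map normal form both ports are reduced to
def rangeForm (K : Nat) (cids : List Int) : List String :=
  (List.range (cids.length / K + if cids.length % K = 0 then 0 else 1)).map
    (fun j => PySem.Str.join "," ((List.take K (List.drop (K * j) cids)).map PySem.Int.toStr))

lemma A_char (cids : List Int) (K : Nat) (hK : 0 < K) :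
    frac_list cids (K : Int) = rangeForm K cids := by
  have hk : (0 : Int) < (K : Int) := by exact_mod_cast hK
  simp only [frac_list, rangeForm]
  rw [PySem.List.foldl_append_singleton_eq_map,
      PySem.Int.floordiv_eq_ediv_of_pos hk, PySem.Int.mod_eq_emod_of_pos hk]
  rw [Int.ofNat_ediv_ofNat, Int.ofNat_mod_ofNat, PySem.List.pyRange_one]
  simp only [sub_zero, Int.toNat_natCast, List.map_map, List.nil_append]
  set L := cids.length with hL
  by_cases hr : L % K = 0
  · rw [if_neg (show ¬ ((L % K : Nat) : Int) ≠ 0 by simp [hr]), if_pos hr]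
    rw [Nat.add_zero]
    refine List.map_congr_left fun j _ => ?_
    simp only [Function.comp_apply, zero_add]
    rw [pvPointA cids K j]
  · rw [if_pos (show ((L % K : Nat) : Int) ≠ 0 by exact_mod_cast hr), if_neg hr,
        List.range_succ, List.map_append, List.map_singleton]
    refine congrArg₂ (· ++ ·) ?_ ?_
    · refine List.map_congr_left fun j _ => ?_
      simp only [Function.comp_apply, zero_add]
      rw [pvPointA cids K j]
    · set q := L / K with hq
      set r := L % K with hrr
      have hrpos : 0 < r := Nat.pos_of_ne_zero hr
      have hrK : r < K := Nat.mod_lt _ hK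
      have hKq : K * q = L - r := by rw [hq, hrr]; exact Nat.mul_div_self_eq_mod_sub_self
      have hlen : (List.drop (L - r) cids).length ≤ K := by
        rw [List.length_drop]; omega
      rw [PySem.List.slice_from_neg_natCast cids r hrpos, ← hL, hKq,
          List.take_of_length_le hlen]

-- chunkStr also equals the range-map normal form
lemma chunkStr_char (K : Nat) (hK : 0 < K) :
    ∀ (n : Nat) (l : List Int), l.length ≤ n → chunkStr K l = rangeForm K l := by
  intro n
  induction n with
  | zero =>
    intro l hl
    have h0 : l = [] := List.eq_nil_of_length_eq_zero (by omega)
    subst h0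
    rw [chunkStr]
    simp [rangeForm]
  | succ n ih =>
    intro l hl
    by_cases h0 : l = []
    · subst h0; rw [chunkStr]; simp [rangeForm]
    · rw [chunkStr, dif_neg (by push_neg; exact ⟨h0, by omega⟩)]
      have hLpos : 0 < l.length := List.length_pos_iff.mpr h0
      have hdrop : (l.drop K).length = l.length - K := List.length_drop
      rw [ih (l.drop K) (by omega)]
      unfold rangeForm
      set L := l.length with hL
      have hm : (l.drop K).length / K + (if (l.drop K).length % K = 0 then 0 else 1) + 1
          = L / K + (if L % K = 0 then 0 else 1) := by
        rw [hdrop]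
        by_cases hLK : K ≤ L
        · have hsub : L - K + K = L := Nat.sub_add_cancel hLK
          have hdiv : L / K = (L - K) / K + 1 := by
            conv_lhs => rw [← hsub]
            rw [Nat.add_div_right _ hK]
          have hmod : (L - K) % K = L % K := by
            conv_rhs => rw [← hsub]
            rw [Nat.add_mod_right]
          rw [hdiv, hmod]; omega
        · have h1 : L - K = 0 := by omega
          have h2 : L % K = L := Nat.mod_eq_of_lt (by omega)
          have h3 : L / K = 0 := Nat.div_eq_of_lt (by omega)
          rw [h1, h2, h3]
          simp [show L ≠ 0 by omega]
      rw [← hm, List.range_succ_eq_map, List.map_cons, List.map_map]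
      refine congrArg₂ (· :: ·) ?_ ?_
      · simp
      · refine List.map_congr_left fun j _ => ?_
        simp only [Function.comp_apply]
        rw [List.drop_drop, show K + K * j = K * j.succ by rw [Nat.mul_succ, Nat.add_comm]]

-- bStep's Int length test, restated over Nat
lemma bStep_eq (K : Nat) (p : List String × List String) (c : Int) :
    bStep (K : Int) p c =
      if p.2.length + 1 = K then (p.1 ++ [PySem.Str.join "," (p.2 ++ [PySem.Int.toStr c])], [])
      else (p.1, p.2 ++ [PySem.Int.toStr c]) := by
  unfold bStep
  simp only [List.length_append, List.length_singleton]
  by_cases h : p.2.length + 1 = K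
  · rw [if_pos (by exact_mod_cast h), if_pos h]
  · rw [if_neg (by exact_mod_cast h), if_neg h]

-- the fold only ever appends to the output component
lemma bFold_out (K : Nat) :
    ∀ (l : List Int) (ch out : List String),
      l.foldl (bStep (K : Int)) (out, ch)
        = (out ++ (l.foldl (bStep (K : Int)) ([], ch)).1, (l.foldl (bStep (K : Int)) ([], ch)).2) := by
  intro l
  induction l with
  | nil => intro ch out; simp
  | cons c l ih =>
    intro ch out
    simp only [List.foldl_cons, bStep_eq]
    by_cases hf : ch.length + 1 = K
    · simp only [if_pos hf, List.nil_append]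
      rw [ih [] (out ++ [PySem.Str.join "," (ch ++ [PySem.Int.toStr c])]),
          ih [] [PySem.Str.join "," (ch ++ [PySem.Int.toStr c])]]
      simp
    · simp only [if_neg hf]
      exact ih _ _

-- a run too short to fill the chunk just accumulates
lemma bFold_small (K : Nat) :
    ∀ (l : List Int) (ch out : List String), ch.length + l.length < K →
      l.foldl (bStep (K : Int)) (out, ch) = (out, ch ++ l.map PySem.Int.toStr) := by
  intro l
  induction l with
  | nil => intro ch out _; simp
  | cons c l ih =>
    intro ch out h
    simp only [List.length_cons] at h
    simp only [List.foldl_cons, bStep_eq, if_neg (show ¬ ch.length + 1 = K by omega)]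
    rw [ih (ch ++ [PySem.Int.toStr c]) out (by simp; omega)]
    simp

-- a run long enough to fill the chunk flushes it after K - |ch| more elements
lemma bFold_big (K : Nat) (hK : 0 < K) :
    ∀ (l : List Int) (ch out : List String), ch.length < K → K ≤ ch.length + l.length →
      l.foldl (bStep (K : Int)) (out, ch)
        = (l.drop (K - ch.length)).foldl (bStep (K : Int))
            (out ++ [PySem.Str.join "," (ch ++ ((l.take (K - ch.length)).map PySem.Int.toStr))], []) := by
  intro l
  induction l with
  | nil => intro ch out h1 h2; simp at h2; omega
  | cons c l ih =>
    intro ch out h1 h2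
    simp only [List.length_cons] at h2
    by_cases hf : ch.length + 1 = K
    · simp only [List.foldl_cons, bStep_eq, if_pos hf]
      have ht : K - ch.length = 1 := by omega
      rw [ht]
      simp
    · simp only [List.foldl_cons, bStep_eq, if_neg hf]
      rw [ih (ch ++ [PySem.Int.toStr c]) out (by simp; omega) (by simp; omega)]
      have ht : K - ch.length = (K - (ch.length + 1)) + 1 := by omega
      rw [ht]
      simp [List.take_succ_cons, List.drop_succ_cons]

-- B computes the chunked list
lemma B_char (K : Nat) (hK : 0 < K) :
    ∀ (n : Nat) (cids : List Int), cids.length ≤ n →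
      frac_list_alt cids (K : Int) = chunkStr K cids := by
  intro n
  induction n with
  | zero =>
    intro cids h
    have : cids = [] := List.eq_nil_of_length_eq_zero (by omega)
    subst this
    rw [chunkStr]
    simp [frac_list_alt]
  | succ n ih =>
    intro cids h
    by_cases h0 : cids = []
    · subst h0; rw [chunkStr]; simp [frac_list_alt]
    · have hLpos : 0 < cids.length := List.length_pos_iff.mpr h0
      rw [chunkStr, dif_neg (by push_neg; exact ⟨h0, by omega⟩)]
      by_cases hsmall : cids.length < K
      · have hdrop : cids.drop K = [] := by
          apply List.eq_nil_of_length_eq_zero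
          rw [List.length_drop]; omega
        rw [hdrop, chunkStr]
        simp only [frac_list_alt]
        rw [bFold_small K cids [] [] (by simpa using hsmall)]
        have hne : cids.map PySem.Int.toStr ≠ [] := by
          simp [List.map_eq_nil_iff, h0]
        rw [List.take_of_length_le (by omega)]
        simp [hne]
      · have hbig : K ≤ cids.length := by omega
        simp only [frac_list_alt]
        rw [bFold_big K hK cids [] [] (by simpa using hK) (by simpa using hbig)]
        simp only [List.length_nil, Nat.sub_zero, List.nil_append]
        rw [bFold_out K (cids.drop K) []]
        have hrec := ih (cids.drop K) (by rw [List.length_drop]; omega)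
        simp only [frac_list_alt] at hrec
        rw [← hrec]
        by_cases hs : ((cids.drop K).foldl (bStep (K : Int)) ([], [])).2 = [] <;>
          simp [hs]

-- ===== VERDICT (by name: the statement is the Claim_ definition above) =====
theorem frac_list_spec : Claim_equal_frac_list := by
  intro cids k _ hpre
  unfold Spec_frac_list
  have hk : 0 < k := hpre
  have hkK : k = ((k.toNat : Nat) : Int) := (Int.toNat_of_nonneg (le_of_lt hk)).symm
  have hKpos : 0 < k.toNat := by omega
  rw [hkK, A_char cids k.toNat hKpos, ← chunkStr_char k.toNat hKpos cids.length cids le_rfl,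
      B_char k.toNat hKpos cids.length cids le_rfl]
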